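-- pv_equiv track=rewrite | github.com/MrBrantCode/unitest_baseline | mut_generate/mist_train_cf/cf_7476/solution.py | sum_of_cubes_of_primes
-- ===== SOURCE A (Python) =====
-- def sum_of_cubes_of_primes(n):
--     def is_prime(num):
--         if num < 2:
--             return False
--         for i in range(2, int(num**0.5) + 1):
--             if num % i == 0:
--                 return False
--         return True
--
--     sum = 0
--     for i in range(1, n + 1):
--         if is_prime(i):
--             sum += i**3
--     return sum
-- ===== SOURCE B (Python) =====
-- def sum_of_cubes_of_primes(n):
--     if n < 2:
--         return 0
--     sieve = [True] * (n + 1)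
--     sieve[0] = False
--     sieve[1] = False
--     p = 2
--     while p * p <= n:
--         for m in range(p * p, n + 1, p):
--             sieve[m] = False
--         p += 1
--     total = 0
--     for i in range(n + 1):
--         if sieve[i]:
--             total += i * i * i
--     return total
-- ===== Notes on version B (the rewrite author's own statement) =====
-- stated objective: faster
-- what changed: Replaces per-number trial division with a sieve: one boolean table of size n+1, multiples of every base p with p*p <= n are marked composite in arithmetic progressions, then cubes of unmarked indices are summed.
import Mathlib
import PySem

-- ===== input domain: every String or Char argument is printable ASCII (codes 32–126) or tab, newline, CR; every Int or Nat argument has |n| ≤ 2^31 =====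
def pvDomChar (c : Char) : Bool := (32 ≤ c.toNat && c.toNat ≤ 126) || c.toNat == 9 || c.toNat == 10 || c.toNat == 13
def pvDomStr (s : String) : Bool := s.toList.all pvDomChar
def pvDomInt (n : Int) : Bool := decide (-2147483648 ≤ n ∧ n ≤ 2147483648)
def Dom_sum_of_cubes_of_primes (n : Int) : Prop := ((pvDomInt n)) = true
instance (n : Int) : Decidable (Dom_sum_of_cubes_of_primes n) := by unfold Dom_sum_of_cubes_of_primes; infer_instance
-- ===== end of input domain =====

-- B replaces A's per-number trial division with a Sieve of Eratosthenes over [0..n] (asymptotically faster).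

-- ===== PORT A =====
-- is_prime: trial division over range(2, int(num**0.5) + 1).
-- 'int(num**0.5)' is ported as Nat.sqrt: exact for every 0 ≤ num ≤ 2^31 (Python's float
-- sqrt agrees with isqrt on that range); '.all' is the loop with its early 'return False'.
def pvIsPrimeA (num : Int) : Bool :=
  if num < 2 then false
  else (PySem.List.pyRange 2 ((Nat.sqrt num.toNat : Int) + 1) 1).all
        (fun i => !(PySem.Int.mod num i == 0))

def sum_of_cubes_of_primes (n : Int) : Int :=
  (PySem.List.pyRange 1 (n + 1) 1).foldl
    (fun s i => if pvIsPrimeA i then s + i ^ 3 else s) 0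

-- ===== PORT B =====
-- inner loop 'for m in range(p*p, n+1, p): sieve[m] = False'
def pvMark (s : Array Bool) (N p : Nat) : Array Bool :=
  (List.range' (p * p) ((N - p * p) / p + 1) p).foldl (fun t m => t.setIfInBounds m false) s

-- 'while p * p <= n: …; p += 1'
def pvMarkLoop (N p : Nat) (s : Array Bool) : Array Bool :=
  if h : p * p ≤ N then pvMarkLoop N (p + 1) (pvMark s N p) else s
  termination_by N + 2 - p
  decreasing_by
    rcases Nat.eq_zero_or_pos p with h0 | h0
    · omega
    · have := Nat.le_mul_of_pos_left p h0; omega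

def sum_of_cubes_of_primes_alt (n : Int) : Int :=
  if n < 2 then 0
  else
    let N := n.toNat
    let sieve := pvMarkLoop N 2 (((Array.replicate (N + 1) true).setIfInBounds 0 false).setIfInBounds 1 false)
    -- 'for i in range(n + 1): if sieve[i]: total += i*i*i'; every index i of the range
    -- is nonnegative and within bounds (len(sieve) = n+1), so 'sieve[i]' is Array.getD
    (PySem.List.pyRange 0 (n + 1) 1).foldl
      (fun s i => if sieve.getD i.toNat false then s + i * i * i else s) 0

-- ===== PRECONDITION & SPEC =====
def Spec_sum_of_cubes_of_primes (n : Int) (out : Int) : Prop := out = sum_of_cubes_of_primes_alt n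
instance (n : Int) (out : Int) : Decidable (Spec_sum_of_cubes_of_primes n out) := by unfold Spec_sum_of_cubes_of_primes; infer_instance

-- ===== CLAIM (what is proved, stated in full; the proofs are below) =====
def Claim_equal_sum_of_cubes_of_primes : Prop := ∀ (n : Int), Dom_sum_of_cubes_of_primes n → Spec_sum_of_cubes_of_primes n (sum_of_cubes_of_primes n)

-- ===== LEMMAS AND PROOFS =====

lemma pvIsPrimeA_eq (i : Int) (h0 : 0 ≤ i) : pvIsPrimeA i = decide (Nat.Prime i.toNat) := by
  by_cases h2 : i < 2
  · have hnp : ¬ Nat.Prime i.toNat := fun hp => by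
      have := hp.two_le; omega
    simp [pvIsPrimeA, h2, hnp]
  · have h2' : (2 : Int) ≤ i := by omega
    set m := i.toNat with hm
    have him : i = (m : Int) := by omega
    have hm2 : 2 ≤ m := by omega
    rw [pvIsPrimeA, if_neg (by omega), Bool.eq_iff_iff]
    simp only [List.all_eq_true, PySem.List.mem_pyRange_one, decide_eq_true_eq,
      Bool.not_eq_eq_eq_not, Bool.not_true, beq_eq_false_iff_ne, ne_eq]
    rw [Nat.prime_def_le_sqrt]
    constructor
    · intro hall
      refine ⟨hm2, fun q hq hqs hdvd => ?_⟩
      have hx : (2 : Int) ≤ (q : Int) := by exact_mod_cast hq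
      have hx2 : (q : Int) < (Nat.sqrt m : Int) + 1 := by exact_mod_cast Nat.lt_succ_of_le hqs
      have := hall (q : Int) ⟨hx, hx2⟩
      exact this ((PySem.Int.mod_eq_zero_iff_dvd i q).2 (him ▸ Int.natCast_dvd_natCast.2 hdvd))
    · rintro ⟨-, hnd⟩ x ⟨hx1, hx2⟩ hmod
      have hq1 : 2 ≤ x.toNat := by omega
      have hq2 : x.toNat ≤ Nat.sqrt m := by
        have : (x.toNat : Int) < (Nat.sqrt m : Int) + 1 := by
          rwa [Int.toNat_of_nonneg (by omega)]
        omega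
      have hdvd : x ∣ i := (PySem.Int.mod_eq_zero_iff_dvd i x).1 hmod
      have : (x.toNat : Nat) ∣ m := by
        rw [← Int.natCast_dvd_natCast]
        rwa [Int.toNat_of_nonneg (by omega), ← him]
      exact hnd x.toNat hq1 hq2 this

lemma size_foldl_set (ms : List Nat) (s : Array Bool) :
    (ms.foldl (fun t m => t.setIfInBounds m false) s).size = s.size := by
  induction ms generalizing s with
  | nil => rfl
  | cons m t ih => simp [List.foldl_cons, ih]

lemma getElem?_foldl_set (ms : List Nat) (s : Array Bool) (j : Nat) :
    (ms.foldl (fun t m => t.setIfInBounds m false) s)[j]? =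
      if j ∈ ms ∧ j < s.size then some false else s[j]? := by
  induction ms generalizing s with
  | nil => simp
  | cons m t ih =>
    rw [List.foldl_cons, ih]
    rw [Array.getElem?_setIfInBounds]
    simp only [Array.size_setIfInBounds, List.mem_cons]
    by_cases hjm : j = m
    · subst hjm
      by_cases hjl : j < s.size <;> simp [hjl]
    · have hmj : ¬ m = j := fun h => hjm h.symm
      simp [hjm, hmj]

lemma mem_multiples {N p j : Nat} (hp : 1 ≤ p) (hj : j ≤ N) :
    j ∈ List.range' (p * p) ((N - p * p) / p + 1) p ↔ p * p ≤ j ∧ p ∣ j := by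
  rw [List.mem_range']
  constructor
  · rintro ⟨i, hi, rfl⟩
    exact ⟨Nat.le_add_right _ _, ⟨p + i, by ring⟩⟩
  · rintro ⟨hle, c, rfl⟩
    have hp0 : 0 < p := hp
    have hpc : p ≤ c := Nat.le_of_mul_le_mul_left hle hp0
    refine ⟨c - p, ?_, ?_⟩
    · have h1 : (c - p) * p ≤ N - p * p := by
        rw [Nat.sub_mul, Nat.mul_comm c p]
        exact Nat.sub_le_sub_right hj _
      have h2 : c - p ≤ (N - p * p) / p := (Nat.le_div_iff_mul_le hp0).2 h1
      omega
    · rw [Nat.mul_sub, Nat.add_sub_cancel' hle]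

lemma getElem?_pvMarkLoop (N p : Nat) (s : Array Bool) :
    ∀ j, 1 ≤ p → s.size = N + 1 → j ≤ N →
    (pvMarkLoop N p s)[j]? =
      if ∃ q ∈ Finset.Icc p j, q * q ≤ j ∧ q ∣ j then some false else s[j]? := by
  induction p, s using pvMarkLoop.induct N with
  | case1 p s hcond ih =>
    intro j hp hs hj
    rw [pvMarkLoop, dif_pos hcond]
    rw [ih j (by omega) (by rw [pvMark, size_foldl_set]; exact hs) hj]
    rw [pvMark, getElem?_foldl_set]
    have hjlt : j < N + 1 := by omega
    simp only [mem_multiples hp hj, hs]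
    have key : (∃ q ∈ Finset.Icc p j, q * q ≤ j ∧ q ∣ j) ↔
        (∃ q ∈ Finset.Icc (p + 1) j, q * q ≤ j ∧ q ∣ j) ∨ (p * p ≤ j ∧ p ∣ j) := by
      constructor
      · rintro ⟨q, hq, hc⟩
        rw [Finset.mem_Icc] at hq
        rcases Nat.eq_or_lt_of_le hq.1 with h | h
        · exact Or.inr (h ▸ hc)
        · exact Or.inl ⟨q, Finset.mem_Icc.2 ⟨h, hq.2⟩, hc⟩
      · rintro (⟨q, hq, hc⟩ | ⟨h1, h2⟩)
        · rw [Finset.mem_Icc] at hq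
          exact ⟨q, Finset.mem_Icc.2 ⟨by omega, hq.2⟩, hc⟩
        · have hpj : p ≤ j := le_trans (Nat.le_mul_of_pos_left p hp) h1
          exact ⟨p, Finset.mem_Icc.2 ⟨le_refl p, hpj⟩, h1, h2⟩
    by_cases hA : ∃ q ∈ Finset.Icc (p + 1) j, q * q ≤ j ∧ q ∣ j
    · rw [if_pos hA, if_pos (key.2 (Or.inl hA))]
    · by_cases hB : p * p ≤ j ∧ p ∣ j
      · rw [if_neg hA, if_pos ⟨hB, hjlt⟩, if_pos (key.2 (Or.inr hB))]
      · have hC : ¬ ∃ q ∈ Finset.Icc p j, q * q ≤ j ∧ q ∣ j := fun h =>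
          (key.1 h).elim hA hB
        rw [if_neg hA, if_neg (fun h => hB h.1), if_neg hC]
  | case2 p s hcond =>
    intro j hp hs hj
    rw [pvMarkLoop, dif_neg hcond]
    rw [if_neg]
    rintro ⟨q, hq, hqq, -⟩
    rw [Finset.mem_Icc] at hq
    exact hcond (le_trans (Nat.mul_le_mul hq.1 hq.1) (le_trans hqq hj))

lemma sieve_getElem (N j : Nat) (hj : j ≤ N) :
    (pvMarkLoop N 2 (((Array.replicate (N + 1) true).setIfInBounds 0 false).setIfInBounds 1 false))[j]? =
      some (decide (Nat.Prime j)) := by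
  rw [getElem?_pvMarkLoop N 2 _ j (by omega) (by simp) hj]
  have hs0 : (((Array.replicate (N + 1) true).setIfInBounds 0 false).setIfInBounds 1 false)[j]? =
      if j = 0 ∨ j = 1 then some false else some true := by
    rw [Array.getElem?_setIfInBounds, Array.getElem?_setIfInBounds]
    rcases Nat.lt_or_ge j 2 with h2 | h2
    · interval_cases j <;> simp <;> omega
    · have h0 : ¬ (1 = j) := by omega
      have h1 : ¬ (0 = j) := by omega
      simp [h0, h1, Nat.lt_succ_of_le hj]
      omega
  rcases Nat.lt_or_ge j 2 with h2 | h2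
  · rw [if_neg, hs0, if_pos (by omega)]
    · interval_cases j <;> simp [Nat.not_prime_zero, Nat.not_prime_one]
    · rintro ⟨q, hq, -, -⟩
      rw [Finset.mem_Icc] at hq
      omega
  · have hiff : (∃ q ∈ Finset.Icc 2 j, q * q ≤ j ∧ q ∣ j) ↔ ¬ Nat.Prime j := by
      constructor
      · rintro ⟨q, hq, hqq, hdvd⟩ hprime
        rw [Finset.mem_Icc] at hq
        rcases (hprime.eq_one_or_self_of_dvd q hdvd) with h | h
        · omega
        · subst h
          have : q ≤ 1 := Nat.le_of_mul_le_mul_left (by simpa using hqq) (by omega)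
          omega
      · intro hnp
        refine ⟨j.minFac, ?_, ?_, Nat.minFac_dvd j⟩
        · rw [Finset.mem_Icc]
          exact ⟨(Nat.minFac_prime (by omega)).two_le, Nat.minFac_le (by omega)⟩
        · have := Nat.minFac_sq_le_self (by omega) hnp
          rwa [Nat.pow_two] at this
    have h01 : ¬ (j = 0 ∨ j = 1) := by omega
    by_cases hp : Nat.Prime j
    · rw [if_neg (fun h => (hiff.1 h) hp), hs0, if_neg h01]
      simp [hp]
    · rw [if_pos (hiff.2 hp)]
      simp [hp]

lemma foldl_if_add {α : Type} (l : List α) (p : α → Bool) (g : α → Int) (a : Int) :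
    l.foldl (fun s x => if p x then s + g x else s) a =
      a + (l.map (fun x => if p x then g x else 0)).sum := by
  induction l generalizing a with
  | nil => simp
  | cons x t ih =>
    by_cases h : p x <;> simp [List.foldl_cons, h, ih] <;> ring

-- ===== VERDICT (by name: the statement is the Claim_ definition above) =====
theorem sum_of_cubes_of_primes_spec : Claim_equal_sum_of_cubes_of_primes := by
  intro n _
  unfold Spec_sum_of_cubes_of_primes
  by_cases hn2 : n < 2
  · rw [sum_of_cubes_of_primes_alt, if_pos hn2, sum_of_cubes_of_primes]
    rcases le_or_gt n 0 with h | h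
    · rw [PySem.List.pyRange_one_eq_nil (by omega)]
      rfl
    · have hn1 : n = 1 := by omega
      subst hn1
      decide
  · set N := n.toNat with hN
    have hn : n = (N : Int) := by omega
    have hB : sum_of_cubes_of_primes_alt n =
        ((List.range (N + 1)).map
          (fun j => if Nat.Prime j then ((j : Int)) * j * j else 0)).sum := by
      rw [sum_of_cubes_of_primes_alt, if_neg hn2]
      simp only [← hN]
      rw [foldl_if_add, zero_add, PySem.List.pyRange_one, List.map_map]
      have hto : ((n + 1 - 0 : Int)).toNat = N + 1 := by omega
      rw [hto]
      apply congrArg List.sum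
      apply List.map_congr_left
      intro k hk
      rw [List.mem_range] at hk
      simp only [Function.comp_apply, zero_add]
      have hget : (pvMarkLoop N 2 (((Array.replicate (N + 1) true).setIfInBounds 0
          false).setIfInBounds 1 false)).getD ((k : Int)).toNat false = decide (Nat.Prime k) := by
        rw [Int.toNat_natCast, Array.getD_eq_getD_getElem?, sieve_getElem N k (by omega)]
        rfl
      rw [hget]
      by_cases hp : Nat.Prime k <;> simp [hp]
    have hA : sum_of_cubes_of_primes n =
        ((List.range (N + 1)).map
          (fun j => if Nat.Prime j then ((j : Int)) * j * j else 0)).sum := by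
      rw [sum_of_cubes_of_primes, foldl_if_add, zero_add, PySem.List.pyRange_one,
        add_sub_cancel_right, List.map_map]
      rw [List.range_succ_eq_map]
      rw [List.map_cons, List.map_map, List.sum_cons]
      rw [if_neg (by simp [Nat.not_prime_zero]), zero_add]
      apply congrArg List.sum
      apply List.map_congr_left
      intro k _
      simp only [Function.comp_apply]
      have hcast : ((1 : Int) + (k : Int)).toNat = k.succ := by omega
      rw [pvIsPrimeA_eq _ (by omega), hcast]
      by_cases hp : Nat.Prime k.succ <;> simp [hp, Nat.succ_eq_add_one] <;> ring
    rw [hA, hB]
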